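-- pv_equiv track=rewrite | github.com/JeongSae/Algorithm | programmers/Level1/예산.py | solution
-- ===== SOURCE A (Python) =====
-- def solution(arr, budget):
--     cnt = 0
--     for i in range(len(arr)):
--         min_index = arr.index(min(arr))
--         pop_min_value = arr.pop(min_index)
--         budget -= pop_min_value
--         if budget >= 0:
--             cnt += 1
--         else:
--             return cnt
--
--     return cnt
-- ===== SOURCE B (Python) =====
-- def solution(arr, budget):
--     cnt = 0
--     for v in sorted(arr):
--         budget -= v
--         if budget < 0:
--             break
--         cnt += 1
--     return cnt
-- ===== Notes on version B (the rewrite author's own statement) =====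
-- stated objective: faster
-- what changed: A repeatedly scans for the minimum and pops it (min + index + pop per iteration); B sorts once and counts along the sorted list while the running budget stays nonnegative.
import Mathlib
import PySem

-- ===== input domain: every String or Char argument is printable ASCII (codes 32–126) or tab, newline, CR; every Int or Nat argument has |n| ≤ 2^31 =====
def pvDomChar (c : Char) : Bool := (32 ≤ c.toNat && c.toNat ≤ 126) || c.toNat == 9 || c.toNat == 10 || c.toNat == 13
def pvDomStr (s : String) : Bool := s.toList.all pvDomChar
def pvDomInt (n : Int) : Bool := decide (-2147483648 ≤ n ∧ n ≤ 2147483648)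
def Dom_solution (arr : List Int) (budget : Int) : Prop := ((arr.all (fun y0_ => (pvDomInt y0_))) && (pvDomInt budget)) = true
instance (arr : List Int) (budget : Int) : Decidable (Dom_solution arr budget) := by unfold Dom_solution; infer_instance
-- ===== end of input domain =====

-- B replaces A's repeated min-scan-and-pop with a single sort plus one counting pass (equivalence
-- is about the RETURN value only: Python A pops from its argument list in place, B does not mutate it).

-- ===== PORT A =====
-- A's for-loop over range(len(arr)): fuel = initial length; each iteration finds min, its index,
-- pops it, subtracts from budget, counts or returns early. The 'none' branches are unreachable
-- (the list is nonempty while fuel remains) and return cnt.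
def solutionLoop : Nat → List Int → Int → Int → Int
  | 0, _, _, cnt => cnt
  | f + 1, arr, budget, cnt =>
    match PySem.List.min? arr (fun x => x) with
    | none => cnt
    | some m =>
      match PySem.List.index? arr m with
      | none => cnt
      | some i =>
        match PySem.List.pop? arr (i : Int) with
        | none => cnt
        | some (v, rest) =>
          let budget' := budget - v
          if budget' ≥ 0 then solutionLoop f rest budget' (cnt + 1) else cnt

def solution (arr : List Int) (budget : Int) : Int :=
  solutionLoop arr.length arr budget 0

-- ===== PORT B =====
-- Source B: walk sorted(arr), subtract each value, break when budget goes negative, else count.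
def solutionAltLoop : List Int → Int → Int → Int
  | [], _, cnt => cnt
  | v :: rest, budget, cnt =>
    let budget' := budget - v
    if budget' < 0 then cnt else solutionAltLoop rest budget' (cnt + 1)

def solution_alt (arr : List Int) (budget : Int) : Int :=
  solutionAltLoop (PySem.List.sorted arr (fun x => x)) budget 0

-- ===== PRECONDITION & SPEC =====
def Spec_solution (arr : List Int) (budget : Int) (out : Int) : Prop := out = solution_alt arr budget
instance (arr : List Int) (budget : Int) (out : Int) : Decidable (Spec_solution arr budget out) := by unfold Spec_solution; infer_instance

-- ===== CLAIM (what is proved, stated in full; the proofs are below) =====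
def Claim_equal_solution : Prop := ∀ (arr : List Int) (budget : Int), Dom_solution arr budget → Spec_solution arr budget (solution arr budget)

-- ===== LEMMAS AND PROOFS =====

-- one A-step on a nonempty list pops exactly the minimum value, leaving l.erase m
theorem pop_min_step (l : List Int) (m : Int)
    (h : PySem.List.min? l (fun x => x) = some m) :
    ∃ i, PySem.List.index? l m = some i ∧
      PySem.List.pop? l (i : Int) = some (m, l.erase m) := by
  have hmem : m ∈ l := PySem.List.min?_mem h
  obtain ⟨i, hi⟩ := Option.isSome_iff_exists.mp ((PySem.List.index?_isSome_iff l m).mpr hmem)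
  refine ⟨i, hi, ?_⟩
  obtain ⟨pre, suf, hdecomp, hlen, hnot⟩ := (PySem.List.index?_eq_some_iff l m i).mp hi
  have hlt : i < l.length := by
    subst hdecomp; simp [← hlen]
  rw [PySem.List.pop?_natCast l i hlt]
  subst hdecomp
  have hget : (pre ++ m :: suf)[i] = m := by
    have : (pre ++ m :: suf)[pre.length]'(by simp) = m := by
      simp
    simp only [hlen] at this; exact this
  have herase : (pre ++ m :: suf).erase m = pre ++ suf := by
    rw [List.erase_append_right _ (by simpa using hnot)]
    simp
  have heraseIdx : (pre ++ m :: suf).eraseIdx i = pre ++ suf := by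
    subst hlen
    simp [List.eraseIdx_append_of_length_le (le_refl pre.length)]
  rw [hget, herase, heraseIdx]

-- the minimum VALUE is the same for permuted lists
theorem min_value_perm (l l' : List Int) (m m' : Int) (hp : l.Perm l')
    (h : PySem.List.min? l (fun x => x) = some m)
    (h' : PySem.List.min? l' (fun x => x) = some m') : m = m' := by
  have hm : m ∈ l := PySem.List.min?_mem h
  have hm' : m' ∈ l' := PySem.List.min?_mem h'
  have h1 : m ≤ m' := PySem.List.min?_isMin h m' (hp.symm.mem_iff.mp hm')
  have h2 : m' ≤ m := PySem.List.min?_isMin h' m (hp.mem_iff.mp hm)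
  omega

-- A's loop depends only on the multiset of remaining values
theorem solutionLoop_perm : ∀ (n : Nat) (l l' : List Int) (b cnt : Int),
    n = l.length → l.Perm l' →
    solutionLoop n l b cnt = solutionLoop n l' b cnt := by
  intro n
  induction n with
  | zero => intro l l' b cnt _ _; rfl
  | succ f ih =>
    intro l l' b cnt hn hp
    have hne : l ≠ [] := by intro h; subst h; simp at hn
    have hne' : l' ≠ [] := by
      intro h; subst h; exact hne hp.eq_nil
    obtain ⟨m, hm⟩ : ∃ m, PySem.List.min? l (fun x => x) = some m := by
      cases hml : PySem.List.min? l (fun x => x) with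
      | none => exact absurd ((PySem.List.min?_eq_none_iff l _).mp hml) hne
      | some m => exact ⟨m, rfl⟩
    obtain ⟨m', hm'⟩ : ∃ m', PySem.List.min? l' (fun x => x) = some m' := by
      cases hml : PySem.List.min? l' (fun x => x) with
      | none => exact absurd ((PySem.List.min?_eq_none_iff l' _).mp hml) hne'
      | some m => exact ⟨m, rfl⟩
    have hmm : m = m' := min_value_perm l l' m m' hp hm hm'
    subst hmm
    obtain ⟨i, hi, hpop⟩ := pop_min_step l m hm
    obtain ⟨i', hi', hpop'⟩ := pop_min_step l' m hm'
    have hmem : m ∈ l := PySem.List.min?_mem hm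
    have hperase : (l.erase m).Perm (l'.erase m) := hp.erase m
    have hlen : f = (l.erase m).length := by
      have := List.length_erase_of_mem hmem
      omega
    simp only [solutionLoop, hm, hm', hi, hi', hpop, hpop']
    split_ifs with hb
    · exact ih (l.erase m) (l'.erase m) _ _ hlen hperase
    · rfl

-- foldl min over a list everywhere ≥ v stays v
theorem foldl_min_of_le : ∀ (t : List Int) (v : Int), (∀ y ∈ t, v ≤ y) → t.foldl min v = v := by
  intro t
  induction t with
  | nil => intro v _; rfl
  | cons y t ih =>
    intro v h
    have hvy : min v y = v := min_eq_left (h y (by simp))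
    simp only [List.foldl_cons, hvy]
    exact ih v (fun z hz => h z (by simp [hz]))

-- on an already-sorted list A's loop coincides with B's single pass
theorem solutionLoop_sorted : ∀ (s : List Int) (b cnt : Int),
    s.Pairwise (· ≤ ·) →
    solutionLoop s.length s b cnt = solutionAltLoop s b cnt := by
  intro s
  induction s with
  | nil => intro b cnt _; rfl
  | cons v rest ih =>
    intro b cnt hpair
    have hle : ∀ y ∈ rest, v ≤ y := (List.pairwise_cons.mp hpair).1
    have hmin : PySem.List.min? (v :: rest) (fun x => x) = some v := by
      rw [PySem.List.min?_id_cons, foldl_min_of_le rest v hle]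
    have hidx : PySem.List.index? (v :: rest) v = some 0 := PySem.List.index?_cons_self v rest
    simp only [List.length_cons, solutionLoop, hmin, hidx, Nat.cast_zero,
      PySem.List.pop?_zero_cons, solutionAltLoop]
    split_ifs with h1 h2
    · omega
    · exact ih (b - v) (cnt + 1) (List.pairwise_cons.mp hpair).2
    · rfl
    · omega

-- ===== VERDICT (by name: the statement is the Claim_ definition above) =====
theorem solution_spec : Claim_equal_solution := by
  intro arr budget _
  unfold Spec_solution solution solution_alt
  have hperm : (PySem.List.sorted arr (fun x => x) false).Perm arr := PySem.List.sorted_perm arr _ _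
  have hpair : (PySem.List.sorted arr (fun x => x) false).Pairwise (· ≤ ·) := by
    simpa using PySem.List.sorted_pairwise arr (fun x => x)
  calc solutionLoop arr.length arr budget 0
      = solutionLoop (PySem.List.sorted arr (fun x => x) false).length
          (PySem.List.sorted arr (fun x => x) false) budget 0 := by
        rw [hperm.length_eq]
        exact (solutionLoop_perm _ _ _ _ _ rfl hperm.symm)
    _ = solutionAltLoop (PySem.List.sorted arr (fun x => x) false) budget 0 :=
        solutionLoop_sorted _ _ _ hpair
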